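-- pv_equiv track=rewrite | github.com/FredDev12/projet_devnet | projet_devnet/projet.py | parse_version_info
-- ===== SOURCE A (Python) =====
-- def parse_version_info(show_version):
--     """Extrait les informations de version"""
--     version = "Inconnue"
--     model = "Inconnu"
--     uptime = "Inconnu"
--
--     lines = show_version.splitlines()
--     for i, line in enumerate(lines):
--         line_lower = line.lower()
--
--         if "version" in line_lower and version == "Inconnue":
--             version = line.strip()
--
--         if "uptime" in line_lower:
--             uptime = line.strip()
--
--             if i + 1 < len(lines) and lines[i + 1].strip():
--                 uptime += " " + lines[i + 1].strip()
--
--         if "software (" in line_lower and model == "Inconnu":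
--
--             parts = line.split("(")
--             if len(parts) > 1:
--                 model = parts[1].replace(")", "").strip()
--
--     return version, model, uptime
-- ===== SOURCE B (Python) =====
-- def parse_version_info(show_version):
--     """Extrait les informations de version"""
--     lines = show_version.splitlines()
--
--     version = next((l.strip() for l in lines if "version" in l.lower()), "Inconnue")
--
--     model = "Inconnu"
--     for l in lines:
--         if "software (" in l.lower():
--             parts = l.split("(")
--             if len(parts) > 1:
--                 model = parts[1].replace(")", "").strip()
--             break
--
--     uptime = "Inconnu"
--     for i in range(len(lines) - 1, -1, -1):
--         if "uptime" in lines[i].lower():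
--             uptime = lines[i].strip()
--             nxt = lines[i + 1].strip() if i + 1 < len(lines) else ""
--             if nxt:
--                 uptime += " " + nxt
--             break
--
--     return version, model, uptime
-- ===== Notes on version B (the rewrite author's own statement) =====
-- stated objective: idiomatic
-- what changed: The single stateful enumerate loop is decomposed into three independent extractions: a first-match search for version, a first-match break loop for model, and a reversed-index last-match break loop for uptime.
import Mathlib
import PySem

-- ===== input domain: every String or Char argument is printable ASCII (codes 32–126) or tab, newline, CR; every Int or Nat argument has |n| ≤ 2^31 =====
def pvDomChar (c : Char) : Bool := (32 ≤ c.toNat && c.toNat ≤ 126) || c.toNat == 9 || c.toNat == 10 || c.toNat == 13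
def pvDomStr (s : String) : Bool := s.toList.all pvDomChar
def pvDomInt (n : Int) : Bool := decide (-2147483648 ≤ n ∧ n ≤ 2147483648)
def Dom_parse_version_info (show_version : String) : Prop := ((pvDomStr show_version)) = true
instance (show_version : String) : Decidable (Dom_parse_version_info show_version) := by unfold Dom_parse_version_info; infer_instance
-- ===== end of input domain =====

-- B decomposes A's single stateful line loop into three independent field extractions
-- (first match for version/model, last match for uptime); objective: idiomatic.


-- ===== PORT A =====
-- one iteration of A's enumerate loop over the state (version, model, uptime)
def pvStepA (lines : List String) (st : String × String × String) (p : Int × String) : String × String × String :=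
  let line_lower := PySem.Str.lower p.2
  let version :=
    if PySem.Str.isIn "version" line_lower && (st.1 == "Inconnue") then PySem.Str.strip p.2 else st.1
  let uptime :=
    if PySem.Str.isIn "uptime" line_lower then
      let u := PySem.Str.strip p.2
      if p.1 + 1 < (lines.length : Int) ∧
          PySem.Str.strip ((PySem.List.pyGet? lines (p.1 + 1)).getD "") ≠ "" then
        u ++ " " ++ PySem.Str.strip ((PySem.List.pyGet? lines (p.1 + 1)).getD "")
      else u
    else st.2.2
  let model :=
    if PySem.Str.isIn "software (" line_lower && (st.2.1 == "Inconnu") then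
      let parts := (PySem.Str.split? p.2 "(").getD []
      if parts.length > 1 then PySem.Str.strip (PySem.Str.replace (parts.getD 1 "") ")" "") else st.2.1
    else st.2.1
  (version, model, uptime)

def parse_version_info (show_version : String) : String × String × String :=
  let lines := PySem.Str.splitlines show_version
  (PySem.List.enumerate lines 0).foldl (pvStepA lines) ("Inconnue", "Inconnu", "Inconnu")

-- ===== PORT B =====
def pvHasV (l : String) : Bool := PySem.Str.isIn "version" (PySem.Str.lower l)
def pvHasM (l : String) : Bool := PySem.Str.isIn "software (" (PySem.Str.lower l)
def pvHasU (l : String) : Bool := PySem.Str.isIn "uptime" (PySem.Str.lower l)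

-- model extracted from one matching line (B's break-loop body)
def pvModelOf (l : String) : String :=
  let parts := (PySem.Str.split? l "(").getD []
  if parts.length > 1 then PySem.Str.strip (PySem.Str.replace (parts.getD 1 "") ")" "") else "Inconnu"

-- uptime from the matching line at index i, with the next-line lookahead
def pvUptimeOf (lines : List String) (i : Int) (l : String) : String :=
  let u := PySem.Str.strip l
  let nxt := if i + 1 < (lines.length : Int) then PySem.Str.strip ((PySem.List.pyGet? lines (i + 1)).getD "") else ""
  if nxt ≠ "" then u ++ " " ++ nxt else u

def parse_version_info_alt (show_version : String) : String × String × String :=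
  let lines := PySem.Str.splitlines show_version
  let version := match lines.find? pvHasV with
    | some l => PySem.Str.strip l
    | none => "Inconnue"
  let model := match lines.find? pvHasM with
    | some l => pvModelOf l
    | none => "Inconnu"
  -- B's reversed-range break loop = first match over the reversed enumerated lines
  let uptime := match (PySem.List.enumerate lines 0).reverse.find? (fun p => pvHasU p.2) with
    | some p => pvUptimeOf lines p.1 p.2
    | none => "Inconnu"
  (version, model, uptime)

-- ===== PRECONDITION & SPEC =====
-- Pre_ excludes inputs where a matching line's extracted value collides with A's French
-- sentinel ("Inconnue"/"Inconnu"), on which A's sentinel-equality guard accidentally lets a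
-- later matching line overwrite the field while B keeps the first match.
def Pre_parse_version_info (show_version : String) : Prop :=
  ∀ l ∈ PySem.Str.splitlines show_version,
    (pvHasV l = true → PySem.Str.strip l ≠ "Inconnue") ∧
    (pvHasM l = true → pvModelOf l ≠ "Inconnu")
instance (show_version : String) : Decidable (Pre_parse_version_info show_version) := by
  unfold Pre_parse_version_info; infer_instance

def pvWitness_parse_version_info : String :=
  "Cisco IOS Software (C2900-X), Version 15.1\nRouter uptime is 1 week\n 2 hours"

def Spec_parse_version_info (show_version : String) (out : String × String × String) : Prop := out = parse_version_info_alt show_version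
instance (show_version : String) (out : String × String × String) : Decidable (Spec_parse_version_info show_version out) := by unfold Spec_parse_version_info; infer_instance

-- ===== CLAIM (what is proved, stated in full; the proofs are below) =====
def Claim_equal_parse_version_info : Prop := ∀ (show_version : String), Dom_parse_version_info show_version → Pre_parse_version_info show_version → Spec_parse_version_info show_version (parse_version_info show_version)

-- ===== LEMMAS AND PROOFS =====

-- the three independent scalar steps A's loop body decomposes into
def pvStepV (v : String) (p : Int × String) : String :=
  if pvHasV p.2 && (v == "Inconnue") then PySem.Str.strip p.2 else v

def pvStepM (m : String) (p : Int × String) : String :=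
  if pvHasM p.2 && (m == "Inconnu") then
    let parts := (PySem.Str.split? p.2 "(").getD []
    if parts.length > 1 then PySem.Str.strip (PySem.Str.replace (parts.getD 1 "") ")" "") else m
  else m

def pvStepU (lines : List String) (u : String) (p : Int × String) : String :=
  if pvHasU p.2 then
    let w := PySem.Str.strip p.2
    if p.1 + 1 < (lines.length : Int) ∧
        PySem.Str.strip ((PySem.List.pyGet? lines (p.1 + 1)).getD "") ≠ "" then
      w ++ " " ++ PySem.Str.strip ((PySem.List.pyGet? lines (p.1 + 1)).getD "")
    else w
  else u

theorem pvStepA_eq (lines : List String) (st : String × String × String) (p : Int × String) :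
    pvStepA lines st p = (pvStepV st.1 p, pvStepM st.2.1 p, pvStepU lines st.2.2 p) := rfl

theorem pvFold_split (lines : List String) (E : List (Int × String)) (st : String × String × String) :
    E.foldl (pvStepA lines) st =
      (E.foldl pvStepV st.1, E.foldl pvStepM st.2.1, E.foldl (pvStepU lines) st.2.2) := by
  induction E generalizing st with
  | nil => rfl
  | cons e es ih => simp [List.foldl, pvStepA_eq, ih]

theorem pvFoldV_fixed (E : List (Int × String)) (v : String) (hv : v ≠ "Inconnue") :
    E.foldl pvStepV v = v := by
  induction E with
  | nil => rfl
  | cons e es ih => simpa [List.foldl, pvStepV, hv] using ih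

theorem pvFoldV (E : List (Int × String))
    (h : ∀ p ∈ E, pvHasV p.2 = true → PySem.Str.strip p.2 ≠ "Inconnue") :
    E.foldl pvStepV "Inconnue" =
      (match E.find? (fun p => pvHasV p.2) with
        | some p => PySem.Str.strip p.2
        | none => "Inconnue") := by
  induction E with
  | nil => rfl
  | cons e es ih =>
    by_cases he : pvHasV e.2 = true
    · rw [List.foldl_cons, List.find?_cons_of_pos (by simpa using he)]
      have hstep : pvStepV "Inconnue" e = PySem.Str.strip e.2 := by simp [pvStepV, he]
      rw [hstep]
      exact pvFoldV_fixed es _ (h e List.mem_cons_self he)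
    · rw [List.foldl_cons, List.find?_cons_of_neg (by simpa using he)]
      have hstep : pvStepV "Inconnue" e = "Inconnue" := by simp [pvStepV, he]
      rw [hstep]
      exact ih (fun p hp => h p (List.mem_cons_of_mem _ hp))

theorem pvFoldM_fixed (E : List (Int × String)) (m : String) (hm : m ≠ "Inconnu") :
    E.foldl pvStepM m = m := by
  induction E with
  | nil => rfl
  | cons e es ih => simpa [List.foldl, pvStepM, hm] using ih

theorem pvFoldM (E : List (Int × String))
    (h : ∀ p ∈ E, pvHasM p.2 = true → pvModelOf p.2 ≠ "Inconnu") :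
    E.foldl pvStepM "Inconnu" =
      (match E.find? (fun p => pvHasM p.2) with
        | some p => pvModelOf p.2
        | none => "Inconnu") := by
  induction E with
  | nil => rfl
  | cons e es ih =>
    by_cases he : pvHasM e.2 = true
    · have hmo := h e List.mem_cons_self he
      rw [List.foldl_cons, List.find?_cons_of_pos (by simpa using he)]
      have hstep : pvStepM "Inconnu" e = pvModelOf e.2 := by
        by_cases hl : ((PySem.Str.split? e.2 "(").getD []).length > 1
        · simp [pvStepM, pvModelOf, he, hl]
        · simp [pvStepM, pvModelOf, he, hl]
      rw [hstep]
      exact pvFoldM_fixed es _ hmo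
    · rw [List.foldl_cons, List.find?_cons_of_neg (by simpa using he)]
      have hstep : pvStepM "Inconnu" e = "Inconnu" := by simp [pvStepM, he]
      rw [hstep]
      exact ih (fun p hp => h p (List.mem_cons_of_mem _ hp))

theorem pvStepU_eq (lines : List String) (u : String) (p : Int × String) (hp : pvHasU p.2 = true) :
    pvStepU lines u p = pvUptimeOf lines p.1 p.2 := by
  simp only [pvStepU, pvUptimeOf, hp, if_true]
  by_cases hi : p.1 + 1 < (lines.length : Int)
  · simp [hi]
  · simp [hi]

theorem pvFoldU (lines : List String) (E : List (Int × String)) (u : String) :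
    E.foldl (pvStepU lines) u =
      (match E.reverse.find? (fun p => pvHasU p.2) with
        | some p => pvUptimeOf lines p.1 p.2
        | none => u) := by
  induction E generalizing u with
  | nil => rfl
  | cons e es ih =>
    simp only [List.foldl, List.reverse_cons, List.find?_append, ih]
    cases hfind : es.reverse.find? (fun p => pvHasU p.2) with
    | some p => simp
    | none =>
      by_cases he : pvHasU e.2 = true
      · rw [List.find?_cons_of_pos (by simpa using he)]
        simp [pvStepU_eq lines u e he]
      · rw [List.find?_cons_of_neg (by simpa using he)]
        simp [pvStepU, he]

theorem pvFind?_enumerate_snd (q : String → Bool) (xs : List String) (s : Int) :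
    ((PySem.List.enumerate xs s).find? (fun p => q p.2)).map (·.2) = xs.find? q := by
  induction xs generalizing s with
  | nil => simp [PySem.List.enumerate_nil]
  | cons x xs ih =>
    rw [PySem.List.enumerate_cons]
    by_cases hq : q x = true
    · rw [List.find?_cons_of_pos (by simpa using hq), List.find?_cons_of_pos hq]
      rfl
    · rw [List.find?_cons_of_neg (by simpa using hq), List.find?_cons_of_neg hq]
      exact ih (s + 1)

theorem pvMem_enumerate_snd {p : Int × String} {xs : List String} (h : p ∈ PySem.List.enumerate xs 0) :
    p.2 ∈ xs := by
  have h2 : p.2 ∈ (PySem.List.enumerate xs 0).map (·.2) := List.mem_map_of_mem h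
  rwa [PySem.List.map_snd_enumerate] at h2

-- ===== VERDICT (by name: the statement is the Claim_ definition above) =====
theorem parse_version_info_spec : Claim_equal_parse_version_info := by
  intro sv _ hpre
  unfold Spec_parse_version_info parse_version_info parse_version_info_alt
  set lines := PySem.Str.splitlines sv with hlines
  set E := PySem.List.enumerate lines 0 with hE
  rw [pvFold_split]
  have hV : ∀ p ∈ E, pvHasV p.2 = true → PySem.Str.strip p.2 ≠ "Inconnue" :=
    fun p hp => (hpre p.2 (pvMem_enumerate_snd hp)).1
  have hM : ∀ p ∈ E, pvHasM p.2 = true → pvModelOf p.2 ≠ "Inconnu" :=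
    fun p hp => (hpre p.2 (pvMem_enumerate_snd hp)).2
  rw [pvFoldV E hV, pvFoldM E hM, pvFoldU lines E]
  refine congrArg₂ Prod.mk ?_ (congrArg₂ Prod.mk ?_ rfl)
  · have := pvFind?_enumerate_snd pvHasV lines 0
    cases hf : E.find? (fun p => pvHasV p.2) with
    | some p => rw [hf] at this; rw [← this]; rfl
    | none => rw [hf] at this; rw [← this]; rfl
  · have := pvFind?_enumerate_snd pvHasM lines 0
    cases hf : E.find? (fun p => pvHasM p.2) with
    | some p => rw [hf] at this; rw [← this]; rfl
    | none => rw [hf] at this; rw [← this]; rfl
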